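-- pv_equiv track=rewrite | github.com/channymc/coverpack | sg.py | _scan_json_string
-- ===== SOURCE A (Python) =====
-- def _scan_json_string(text: str, start: int) -> int:
--     """
--     Starting just after the opening '"' at text[start], find the index
--     of the closing unescaped '"'.  Returns index of the closing quote.
--     Handles all \\uXXXX and single-character escape sequences.
--     """
--     i = start
--     n = len(text)
--     while i < n:
--         c = text[i]
--         if c == "\\":
--             i += 2  # skip escaped character (handles \", \\, \/, \b, \f, \n, \r, \t, \uXXXX)
--             continue
--         if c == '"':
--             return i
--         i += 1
--     return i  # unterminated string — return end
-- ===== SOURCE B (Python) =====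
-- def _scan_json_string(text: str, start: int) -> int:
--     """
--     Starting just after the opening '"' at text[start], find the index
--     of the closing unescaped '"'.  Returns index of the closing quote.
--
--     Find-driven jump scan: instead of inspecting every character, jump
--     straight to the next backslash / quote with str.find.
--     """
--     i = start
--     n = len(text)
--     while i < n:
--         nb = text.find("\\", i)
--         nq = text.find('"', i)
--         if nq != -1 and (nb == -1 or nq < nb):
--             return nq
--         if nb == -1:
--             return n
--         i = nb + 2  # skip the escaped character
--     return i  # unterminated string — return end
-- ===== Notes on version B (the rewrite author's own statement) =====
-- stated objective: faster
-- what changed: Replaced the per-character while-loop with a find-driven jump scan: each iteration locates the next backslash and the next quote with str.find (a C-level scan) and jumps straight there, instead of testing every character in Python-level code.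
-- outside the precondition, e.g. on _scan_json_string('ab"c', -3): A returns -2, B returns 2
import Mathlib
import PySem

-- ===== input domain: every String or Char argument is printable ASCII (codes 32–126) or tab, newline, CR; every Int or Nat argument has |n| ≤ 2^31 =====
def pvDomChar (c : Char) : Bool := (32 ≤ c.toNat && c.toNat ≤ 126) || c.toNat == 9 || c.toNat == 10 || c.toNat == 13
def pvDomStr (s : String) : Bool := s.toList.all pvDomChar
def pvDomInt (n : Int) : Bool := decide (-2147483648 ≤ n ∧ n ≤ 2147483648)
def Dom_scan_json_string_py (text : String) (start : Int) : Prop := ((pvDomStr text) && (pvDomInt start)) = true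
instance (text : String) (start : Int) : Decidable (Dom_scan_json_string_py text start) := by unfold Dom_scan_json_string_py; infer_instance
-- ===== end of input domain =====

-- B replaces A's per-character scan with a find-driven jump scan (str.find to the next
-- backslash/quote); proved equal to A for all 0 ≤ start (negative start is A's accidental
-- wraparound or an IndexError, excluded by Pre_).


-- ===== PORT A =====
-- while i < n: c = text[i]; if c == '\\': i += 2; elif c == '"': return i; else i += 1; return i
-- pyGet? = text[i] (negative wraparound included); the `none` arm is Python's IndexError
-- (excluded by Pre_; the port returns i there only to stay total).
def scanA_loop (cs : List Char) (i : Int) : Int :=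
  if i < (cs.length : Int) then
    match PySem.List.pyGet? cs i with
    | some c =>
        if c = '\\' then scanA_loop cs (i + 2)
        else if c = '"' then i
        else scanA_loop cs (i + 1)
    | none => i
  else i
termination_by ((cs.length : Int) - i).toNat
decreasing_by all_goals omega

def scan_json_string_py (text : String) (start : Int) : Int :=
  scanA_loop text.toList start

-- ===== PORT B =====
-- The two lemmas below are cited only by scanB_loop's decreasing_by (the jump target
-- nb + 2 strictly increases i).
theorem ff_nonneg (cs sub : List Char) (i : Int) :
    PySem.Chars.findFrom cs sub i none = -1 ∨ 0 ≤ PySem.Chars.findFrom cs sub i none := by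
  have hf := PySem.Chars.neg_one_le_find (List.drop (if i < 0 then if i + ↑cs.length < 0 then 0 else i + ↑cs.length else i).toNat (List.take (↑cs.length : Int).toNat cs)) sub
  simp only [PySem.Chars.findFrom]
  split_ifs with h1 h2 <;> simp_all <;> omega

theorem ff_lb (cs sub : List Char) (i : Int) (hi : 0 ≤ i) :
    PySem.Chars.findFrom cs sub i none = -1 ∨ i ≤ PySem.Chars.findFrom cs sub i none := by
  have hf := PySem.Chars.neg_one_le_find (List.drop (if i < 0 then if i + ↑cs.length < 0 then 0 else i + ↑cs.length else i).toNat (List.take (↑cs.length : Int).toNat cs)) sub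
  simp only [PySem.Chars.findFrom]
  split_ifs with h1 h2 <;> simp_all <;> omega

-- while i < n: nb = text.find('\\', i); nq = text.find('"', i);
--   if nq != -1 and (nb == -1 or nq < nb): return nq
--   if nb == -1: return n
--   i = nb + 2
-- return i
def scanB_loop (cs : List Char) (i : Int) : Int :=
  if i < (cs.length : Int) then
    let nb := PySem.Chars.findFrom cs ['\\'] i none
    let nq := PySem.Chars.findFrom cs ['"'] i none
    if nq ≠ -1 ∧ (nb = -1 ∨ nq < nb) then nq
    else if nb = -1 then (cs.length : Int)
    else scanB_loop cs (nb + 2)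
  else i
termination_by ((cs.length : Int) - i).toNat
decreasing_by
  rcases ff_nonneg cs ['\\'] i with h | h
  · omega
  · rcases Int.lt_or_le i 0 with hi | hi
    · omega
    · rcases ff_lb cs ['\\'] i hi with h' | h' <;> omega

def scan_json_string_py_alt (text : String) (start : Int) : Int :=
  scanB_loop text.toList start

-- ===== PRECONDITION & SPEC =====
-- Pre_ excludes negative start: there A either raises IndexError (start < -len) or returns a
-- value produced by Python's accidental negative-index wraparound (e.g. ("ab\"c", -3) → -2).
def Pre_scan_json_string_py (text : String) (start : Int) : Prop := 0 ≤ start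
instance (text : String) (start : Int) : Decidable (Pre_scan_json_string_py text start) := by
  unfold Pre_scan_json_string_py; infer_instance

def pvWitness_scan_json_string_py : String × Int := ("ab\\\"c\"", 0)

def Spec_scan_json_string_py (text : String) (start : Int) (out : Int) : Prop :=
  out = scan_json_string_py_alt text start
instance (text : String) (start : Int) (out : Int) : Decidable (Spec_scan_json_string_py text start out) := by
  unfold Spec_scan_json_string_py; infer_instance

-- ===== CLAIM (what is proved, stated in full; the proofs are below) =====
def Claim_equal_scan_json_string_py : Prop := ∀ (text : String) (start : Int), Dom_scan_json_string_py text start → Pre_scan_json_string_py text start → Spec_scan_json_string_py text start (scan_json_string_py text start)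

-- ===== LEMMAS AND PROOFS =====

-- [c] is a prefix of l.drop j iff l[j]? = some c
theorem singleton_prefix_drop (l : List Char) (c : Char) (j : Nat) :
    ([c] <+: l.drop j) ↔ l[j]? = some c := by
  rw [← List.head?_drop]
  cases l.drop j with
  | nil => simp
  | cons a t => simp [List.cons_prefix_cons, eq_comm]

-- [c] is an infix of l iff c ∈ l
theorem singleton_infix (l : List Char) (c : Char) : ([c] <:+: l) ↔ c ∈ l := by
  constructor
  · intro h; exact (List.singleton_sublist).mp h.sublist
  · intro h
    obtain ⟨s, t, rfl⟩ := List.append_of_mem h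
    exact ⟨s, t, by simp⟩

-- characterisation of find on a single-character needle
theorem find_char_neg (l : List Char) (c : Char) :
    PySem.Chars.find l [c] = -1 ↔ c ∉ l := by
  rw [PySem.Chars.find_eq_neg_one_iff, singleton_infix]

theorem find_char_spec (l : List Char) (c : Char) (h : PySem.Chars.find l [c] ≠ -1) :
    0 ≤ PySem.Chars.find l [c] ∧ l[(PySem.Chars.find l [c]).toNat]? = some c ∧
      ∀ i < (PySem.Chars.find l [c]).toNat, l[i]? ≠ some c := by
  have h0 : 0 ≤ PySem.Chars.find l [c] := by
    have := PySem.Chars.neg_one_le_find l [c]; omega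
  obtain ⟨h1, h2⟩ := PySem.Chars.find_spec (s := l) (sub := [c]) h0
  exact ⟨h0, (singleton_prefix_drop l c _).mp h1,
    fun i hi hc => h2 i hi ((singleton_prefix_drop l c i).mpr hc)⟩

-- findFrom at k points at k itself when cs[k] = c
theorem findFrom_self (cs : List Char) (c : Char) (k : Nat) (hk : k < cs.length)
    (hc : cs[k] = c) : PySem.Chars.findFrom cs [c] ↑k none = ↑k := by
  rw [PySem.Chars.findFrom_natCast cs [c] k (le_of_lt hk)]
  have hmem : (cs.drop k)[0]? = some c := by
    simp [List.getElem?_drop, hc, hk]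
  have hne : PySem.Chars.find (cs.drop k) [c] ≠ -1 := by
    simp only [ne_eq, find_char_neg, not_not]
    exact List.mem_of_getElem? hmem
  obtain ⟨h0, h1, h2⟩ := find_char_spec (cs.drop k) c hne
  have hz : (PySem.Chars.find (cs.drop k) [c]).toNat = 0 := by
    by_contra hnz
    exact h2 0 (by omega) hmem
  simp [hne]
  omega

-- findFrom's result is ≥ its (nonnegative) start
theorem findFrom_ge (cs : List Char) (sub : List Char) (k : Nat) (hk : k ≤ cs.length)
    (h : PySem.Chars.findFrom cs sub ↑k none ≠ -1) :
    ↑k ≤ PySem.Chars.findFrom cs sub ↑k none :=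
  (PySem.Chars.findFrom_natCast_spec cs sub k hk h).1

-- if findFrom at k equals k then cs[k] starts sub; contrapositive used for the '"' case
theorem findFrom_ne_here (cs : List Char) (c : Char) (k : Nat) (hk : k < cs.length)
    (hc : cs[k] ≠ c) (h : PySem.Chars.findFrom cs [c] ↑k none ≠ -1) :
    (↑k : Int) < PySem.Chars.findFrom cs [c] ↑k none := by
  obtain ⟨h1, h2, h3⟩ := PySem.Chars.findFrom_natCast_spec cs [c] k (le_of_lt hk) h
  rcases lt_or_eq_of_le h1 with h' | h'
  · exact h'
  · exfalso
    apply hc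
    have := (singleton_prefix_drop cs c k).mp (by rw [show k = (PySem.Chars.findFrom cs [c] ↑k none).toNat by omega]; exact h2)
    simpa [List.getElem?_eq_getElem hk] using this
-- stepping over a character that is not c leaves findFrom unchanged
theorem findFrom_step (cs : List Char) (c : Char) (k : Nat) (hk : k < cs.length)
    (hc : cs[k] ≠ c) :
    PySem.Chars.findFrom cs [c] ↑k none = PySem.Chars.findFrom cs [c] ↑(k + 1) none := by
  rw [PySem.Chars.findFrom_natCast cs [c] k (le_of_lt hk),
      PySem.Chars.findFrom_natCast cs [c] (k + 1) (by omega)]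
  have hdrop : cs.drop k = cs[k] :: cs.drop (k + 1) := List.drop_eq_getElem_cons hk
  by_cases h2 : PySem.Chars.find (cs.drop (k + 1)) [c] = -1
  · have h1 : PySem.Chars.find (cs.drop k) [c] = -1 := by
      rw [find_char_neg] at h2 ⊢
      rw [hdrop]
      intro hcontra
      rcases List.mem_cons.mp hcontra with h | h
      · exact hc h.symm
      · exact h2 h
    simp [h1, h2]
  · have h1 : PySem.Chars.find (cs.drop k) [c] ≠ -1 := by
      simp only [ne_eq, find_char_neg, not_not] at h2 ⊢
      rw [hdrop]
      exact List.mem_cons_of_mem _ h2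
    obtain ⟨a0, a1, a2⟩ := find_char_spec (cs.drop k) c h1
    obtain ⟨b0, b1, b2⟩ := find_char_spec (cs.drop (k + 1)) c h2
    set f1 := PySem.Chars.find (cs.drop k) [c] with hf1
    set f2 := PySem.Chars.find (cs.drop (k + 1)) [c] with hf2
    have hf1nz : f1.toNat ≠ 0 := by
      intro hz
      rw [hz, hdrop] at a1
      simp only [List.getElem?_cons_zero, Option.some.injEq] at a1
      exact hc a1
    have hidx : ∀ j : Nat, (cs.drop k)[j + 1]? = (cs.drop (k + 1))[j]? := by
      intro j
      rw [hdrop]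
      simp only [List.getElem?_cons_succ]
    have heq : f1.toNat = f2.toNat + 1 := by
      rcases Nat.lt_trichotomy f1.toNat (f2.toNat + 1) with h | h | h
      · exfalso
        have hj : f1.toNat - 1 < f2.toNat := by omega
        apply b2 (f1.toNat - 1) hj
        rw [← hidx]
        have : f1.toNat - 1 + 1 = f1.toNat := by omega
        rw [this]; exact a1
      · exact h
      · exfalso
        apply a2 (f2.toNat + 1) (by omega)
        rw [hidx]; exact b1
    simp [h1, h2]
    omega

-- one B-step over an ordinary character
theorem scanB_step (cs : List Char) (k : Nat) (hk : k < cs.length)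
    (h1 : cs[k] ≠ '\\') (h2 : cs[k] ≠ '"') :
    scanB_loop cs ↑k = scanB_loop cs ↑(k + 1) := by
  have hb := findFrom_step cs '\\' k hk h1
  have hq := findFrom_step cs '"' k hk h2
  by_cases hlt : k + 1 < cs.length
  · rw [scanB_loop, scanB_loop]
    simp only [hb, hq]
    have c1 : (↑k : Int) < ↑cs.length := by exact_mod_cast hk
    have c2 : ((↑k : Int) + 1) < ↑cs.length := by exact_mod_cast hlt
    simp [c1, c2]
  · -- k + 1 = cs.length: both findFroms at k+1 are -1 and both sides give cs.length
    have hlen : k + 1 = cs.length := by omega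
    have hnone : ∀ c : Char, PySem.Chars.findFrom cs [c] ↑(k + 1) none = -1 := by
      intro c
      rw [PySem.Chars.findFrom_natCast_eq_neg_one_iff cs [c] (k + 1) (by omega)]
      rw [singleton_infix]
      simp [hlen]
    rw [scanB_loop, scanB_loop]
    simp only [hb, hq, hnone]
    have c1 : (↑k : Int) < ↑cs.length := by exact_mod_cast hk
    have c2 : ¬ (((↑k : Int) + 1) < ↑cs.length) := by
      have : ((↑(k + 1) : Int)) = ↑cs.length := by exact_mod_cast congrArg (Nat.cast (R := Int)) hlen
      push_cast at this
      omega
    simp [c1, c2]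
    omega

-- main equivalence: the two loops agree from any nonnegative index
theorem scan_eq (cs : List Char) (k : Nat) : scanA_loop cs ↑k = scanB_loop cs ↑k := by
  by_cases hk : k < cs.length
  · have hget : PySem.List.pyGet? cs (↑k : Int) = some cs[k] := by
      simp [List.getElem?_eq_getElem hk]
    have hlt : (↑k : Int) < ↑cs.length := by exact_mod_cast hk
    by_cases hb : cs[k] = '\\'
    · -- backslash: both jump to k + 2
      have hnb : PySem.Chars.findFrom cs ['\\'] ↑k none = ↑k := findFrom_self cs '\\' k hk hb
      have hA : scanA_loop cs ↑k = scanA_loop cs ↑(k + 2) := by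
        rw [scanA_loop]
        simp [hlt, List.getElem?_eq_getElem hk, hb]
      have hB : scanB_loop cs ↑k = scanB_loop cs ↑(k + 2) := by
        rw [scanB_loop]
        have hnq : ¬ (PySem.Chars.findFrom cs ['"'] ↑k none ≠ -1 ∧
            (PySem.Chars.findFrom cs ['\\'] ↑k none = -1 ∨
             PySem.Chars.findFrom cs ['"'] ↑k none < PySem.Chars.findFrom cs ['\\'] ↑k none)) := by
          rintro ⟨hne, hor⟩
          have hge := findFrom_ge cs ['"'] k (le_of_lt hk) hne
          rw [hnb] at hor
          rcases hor with h | h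
          · omega
          · omega
        have hnz : (↑k : Int) ≠ -1 := by omega
        simp [hlt, hnb, hnz]
        intro h1 h2
        exfalso
        have := findFrom_ge cs ['"'] k (le_of_lt hk) h1
        omega
      rw [hA, hB, scan_eq cs (k + 2)]
    · by_cases hq : cs[k] = '"'
      · -- quote: both return k
        have hnq : PySem.Chars.findFrom cs ['"'] ↑k none = ↑k := findFrom_self cs '"' k hk hq
        have hA : scanA_loop cs ↑k = ↑k := by
          rw [scanA_loop]
          simp [hlt, List.getElem?_eq_getElem hk, hb, hq]
        have hB : scanB_loop cs ↑k = ↑k := by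
          rw [scanB_loop]
          have hcond : PySem.Chars.findFrom cs ['"'] ↑k none ≠ -1 ∧
              (PySem.Chars.findFrom cs ['\\'] ↑k none = -1 ∨
               PySem.Chars.findFrom cs ['"'] ↑k none < PySem.Chars.findFrom cs ['\\'] ↑k none) := by
            constructor
            · rw [hnq]; omega
            · by_cases hnb1 : PySem.Chars.findFrom cs ['\\'] ↑k none = -1
              · exact Or.inl hnb1
              · exact Or.inr (by rw [hnq]; exact findFrom_ne_here cs '\\' k hk hb hnb1)
          simp [hlt, hnq]
          intro h1 h2
          exfalso
          have := findFrom_ne_here cs '\\' k hk hb h1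
          omega
        rw [hA, hB]
      · -- ordinary character: A steps to k + 1, B is unchanged by the step lemma
        have hA : scanA_loop cs ↑k = scanA_loop cs ↑(k + 1) := by
          rw [scanA_loop]
          simp [hlt, List.getElem?_eq_getElem hk, hb, hq]
        rw [hA, scan_eq cs (k + 1), ← scanB_step cs k hk hb hq]
  · -- k ≥ length: both loops return k immediately
    have hlt : ¬ ((↑k : Int) < ↑cs.length) := by simp; exact_mod_cast Nat.le_of_not_lt hk
    rw [scanA_loop, scanB_loop]
    simp [hlt]
termination_by cs.length - k
decreasing_by all_goals omega

-- ===== VERDICT (by name: the statement is the Claim_ definition above) =====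
theorem scan_json_string_py_spec : Claim_equal_scan_json_string_py := by
  intro text start _ hpre
  unfold Spec_scan_json_string_py scan_json_string_py scan_json_string_py_alt
  have h : start = ((start.toNat : Nat) : Int) := by
    unfold Pre_scan_json_string_py at hpre; omega
  rw [h]
  exact scan_eq text.toList start.toNat
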